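-- pv_equiv track=rewrite | github.com/kayhanbora77/AGENCY | GCC/transform_to_duckdb.py | parse_airports
-- ===== SOURCE A (Python) =====
-- def parse_airports(val: str) -> list[str]:
--     """'YYZ/AMS AMS/DXB' -> ['YYZ', 'AMS', 'DXB'] (unique, ordered)"""
--     if not val or val.strip() in ("", "NULL"):
--         return []
--     seen, out = set(), []
--     for part in val.split():
--         for code in part.split("/"):
--             code = code.strip()
--             if code and code not in seen:
--                 seen.add(code)
--                 out.append(code)
--     return out
-- ===== SOURCE B (Python) =====
-- def parse_airports(val: str) -> list[str]:
--     """'YYZ/AMS AMS/DXB' -> ['YYZ', 'AMS', 'DXB'] (unique, ordered)"""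
--     if not val or val.strip() in ("", "NULL"):
--         return []
--     tokens, cur = [], []
--     for ch in val + " ":
--         if ch.isspace() or ch == "/":
--             if cur:
--                 tokens.append("".join(cur))
--                 cur = []
--         else:
--             cur.append(ch)
--     return list(dict.fromkeys(tokens))
-- ===== Notes on version B (the rewrite author's own statement) =====
-- stated objective: alternative
-- what changed: Replaces the nested whitespace-split then slash-split loops with a manual seen-set by a single character-level scan that tokenizes on whitespace-or-slash in one pass, followed by an ordered dedup (dict.fromkeys).
import Mathlib
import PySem

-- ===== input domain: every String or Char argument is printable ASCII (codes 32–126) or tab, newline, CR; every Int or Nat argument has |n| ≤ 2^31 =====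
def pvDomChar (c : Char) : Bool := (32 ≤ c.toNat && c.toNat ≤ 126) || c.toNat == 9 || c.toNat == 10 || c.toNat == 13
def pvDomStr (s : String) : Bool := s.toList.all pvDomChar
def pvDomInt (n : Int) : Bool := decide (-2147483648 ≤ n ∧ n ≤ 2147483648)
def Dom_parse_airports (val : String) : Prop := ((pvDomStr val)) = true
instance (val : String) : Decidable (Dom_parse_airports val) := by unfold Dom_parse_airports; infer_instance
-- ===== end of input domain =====

-- B replaces A's nested whitespace-then-slash split loops and manual seen-set by one character-level
-- scan tokenizing on whitespace-or-slash followed by an ordered dedup (alternative decomposition).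

-- ===== PORT A =====
-- A-side helper: the body of A's innermost loop (one `code`: strip, skip empty/seen, else record)
def pvStepA (st : PySem.Set String × List String) (code0 : List Char) :
    PySem.Set String × List String :=
  let code := String.ofList (PySem.Chars.strip code0)
  if code ≠ "" ∧ PySem.Set.contains st.1 code = false then
    (PySem.Set.add st.1 code, st.2 ++ [code])
  else st

def parse_airports (val : String) : List String :=
  if val = "" ∨ PySem.Str.strip val = "" ∨ PySem.Str.strip val = "NULL" then []
  else
    let st := (PySem.Chars.split₀ val.toList).foldl
      (fun st part => (PySem.Chars.splitOn part ['/']).foldl pvStepA st)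
      (PySem.Set.empty, [])
    st.2

-- ===== PORT B =====
-- B-side helper: one step of B's scan (state = (tokens so far, current token's chars))
def pvStepB (st : List String × List Char) (ch : Char) : List String × List Char :=
  if PySem.Chars.isspace ch || ch == '/' then
    if st.2 ≠ [] then (st.1 ++ [String.ofList st.2], []) else (st.1, [])
  else (st.1, st.2 ++ [ch])

def parse_airports_alt (val : String) : List String :=
  if val = "" ∨ PySem.Str.strip val = "" ∨ PySem.Str.strip val = "NULL" then []
  else PySem.List.dedup (((val ++ " ").toList.foldl pvStepB ([], [])).1)

-- ===== PRECONDITION & SPEC =====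
def Spec_parse_airports (val : String) (out : List String) : Prop := out = parse_airports_alt val
instance (val : String) (out : List String) : Decidable (Spec_parse_airports val out) := by unfold Spec_parse_airports; infer_instance

-- ===== CLAIM (what is proved, stated in full; the proofs are below) =====
def Claim_equal_parse_airports : Prop := ∀ (val : String), Dom_parse_airports val → Spec_parse_airports val (parse_airports val)

-- ===== LEMMAS AND PROOFS =====

-- canonical tokenizer: maximal runs of non-delimiter characters, in order
def pvTok (p : Char → Bool) : List Char → List (List Char)
  | [] => []
  | c :: rest =>
    if p c then pvTok p rest
    else (c :: rest.takeWhile (fun x => !p x)) :: pvTok p (rest.dropWhile (fun x => !p x))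
termination_by l => l.length
decreasing_by
  · simp
  · simp only [List.length_cons]
    exact Nat.lt_succ_of_le (List.length_dropWhile_le _ _)

lemma pvTok_nil (p : Char → Bool) : pvTok p [] = [] := by simp [pvTok]

lemma pvTok_cons_pos (p : Char → Bool) (c : Char) (rest : List Char) (hp : p c = true) :
    pvTok p (c :: rest) = pvTok p rest := by
  rw [pvTok.eq_def]; simp [hp]

lemma pvTok_cons_neg (p : Char → Bool) (c : Char) (rest : List Char) (hp : p c = false) :
    pvTok p (c :: rest) =
      (c :: rest.takeWhile (fun x => !p x)) :: pvTok p (rest.dropWhile (fun x => !p x)) := by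
  rw [pvTok.eq_def]; simp [hp]

lemma pvTW_congr {α} (p q : α → Bool) (l : List α) (h : ∀ c ∈ l, p c = q c) :
    l.takeWhile p = l.takeWhile q ∧ l.dropWhile p = l.dropWhile q := by
  induction l with
  | nil => simp
  | cons c t ih =>
    have hc := h c (by simp)
    by_cases hp : p c
    · have hq : q c := by rw [← hc]; exact hp
      have := ih (fun a ha => h a (by simp [ha]))
      simp [hp, hq, this.1, this.2]
    · have hq : q c = false := by rw [← hc]; simpa using hp
      simp [hp, hq]

lemma pvDW_head {α} (f : α → Bool) (l : List α) (c : α) (t : List α)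
    (h : l.dropWhile f = c :: t) : f c = false := by
  induction l with
  | nil => simp at h
  | cons a l ih =>
    rw [List.dropWhile_cons] at h
    split at h
    · exact ih h
    · rename_i hfa; cases h; simpa using hfa

lemma pvTok_all (p : Char → Bool) (l : List Char) (h : l.all (fun c => !p c) = true) :
    pvTok p l = if l = [] then [] else [l] := by
  cases l with
  | nil => simp [pvTok_nil]
  | cons c rest =>
    simp only [List.all_cons, Bool.and_eq_true, Bool.not_eq_true'] at h
    rw [pvTok_cons_neg p c rest h.1,
        List.takeWhile_eq_self_iff.mpr ?_, List.dropWhile_eq_nil_iff.mpr ?_]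
    · simp [pvTok_nil]
    · intro a ha; have := (List.all_eq_true.mp h.2) a ha; simpa using this
    · intro a ha; have := (List.all_eq_true.mp h.2) a ha; simpa using this

lemma pvTok_append (p : Char → Bool) (d : Char) (hd : p d = true) :
    ∀ (n : ℕ) (s t : List Char), s.length ≤ n →
      pvTok p (s ++ d :: t) = pvTok p s ++ pvTok p t := by
  intro n
  induction n with
  | zero =>
    intro s t hs
    have : s = [] := List.length_eq_zero_iff.mp (Nat.le_zero.mp hs)
    subst this
    simp [pvTok_nil, pvTok_cons_pos p d t hd]
  | succ n ih =>
    intro s t hs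
    cases s with
    | nil => simp [pvTok_nil, pvTok_cons_pos p d t hd]
    | cons c s' =>
      simp only [List.length_cons, Nat.add_le_add_iff_right] at hs
      by_cases hp : p c
      · rw [List.cons_append, pvTok_cons_pos p c _ hp, pvTok_cons_pos p c _ hp]
        exact ih s' t hs
      · rw [List.cons_append, pvTok_cons_neg p c _ (by simpa using hp),
            pvTok_cons_neg p c _ (by simpa using hp)]
        rw [List.takeWhile_append, List.dropWhile_append]
        by_cases hall : (s'.takeWhile (fun x => !p x)).length = s'.length
        · have htw : s'.takeWhile (fun x => !p x) = s' :=
            (List.takeWhile_prefix _).eq_of_length hall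
          have hdw : s'.dropWhile (fun x => !p x) = [] := by
            have := List.takeWhile_append_dropWhile (p := fun x => !p x) (l := s')
            rw [htw] at this
            simpa using this
          rw [if_pos hall, if_pos (by simp [hdw])]
          rw [List.takeWhile_cons, if_neg (by simp [hd]), List.dropWhile_cons,
            if_neg (by simp [hd])]
          rw [pvTok_cons_pos p d t hd, htw, hdw, pvTok_nil]
          simp
        · have hdw : ¬ (s'.dropWhile (fun x => !p x)).isEmpty = true := by
            intro hcon
            apply hall
            have hd0 : s'.dropWhile (fun x => !p x) = [] := by simpa using hcon
            have := List.takeWhile_append_dropWhile (p := fun x => !p x) (l := s')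
            rw [hd0] at this
            simp only [List.append_nil] at this
            rw [this]
          rw [if_neg hall, if_neg hdw]
          have hlen : (s'.dropWhile (fun x => !p x)).length ≤ n :=
            le_trans (List.length_dropWhile_le _ _) hs
          rw [ih _ t hlen]
          simp

lemma pvTok_mem_all (p : Char → Bool) :
    ∀ (n : ℕ) (l : List Char), l.length ≤ n → ∀ w ∈ pvTok p l, w.all (fun c => !p c) = true := by
  intro n
  induction n with
  | zero =>
    intro l hl w hw
    have : l = [] := List.length_eq_zero_iff.mp (Nat.le_zero.mp hl)
    subst this
    simp [pvTok_nil] at hw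
  | succ n ih =>
    intro l hl w hw
    cases l with
    | nil => simp [pvTok_nil] at hw
    | cons c rest =>
      simp only [List.length_cons, Nat.add_le_add_iff_right] at hl
      by_cases hp : p c
      · rw [pvTok_cons_pos p c rest hp] at hw
        exact ih rest hl w hw
      · rw [pvTok_cons_neg p c rest (by simpa using hp)] at hw
        rcases List.mem_cons.mp hw with h | h
        · subst h
          simp only [List.all_cons, Bool.and_eq_true, Bool.not_eq_true']
          refine ⟨by simpa using hp, ?_⟩
          exact List.all_eq_true.mpr (fun a ha => by
            simpa using List.mem_takeWhile_imp ha)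
        · exact ih _ (le_trans (List.length_dropWhile_le _ _) hl) w h

lemma pvTok_or_nop (p q : Char → Bool) :
    ∀ (n : ℕ) (w : List Char), w.length ≤ n → w.all (fun c => !p c) = true →
      pvTok (fun c => p c || q c) w = pvTok q w := by
  intro n
  induction n with
  | zero =>
    intro w hw _
    have : w = [] := List.length_eq_zero_iff.mp (Nat.le_zero.mp hw)
    subst this
    simp [pvTok_nil]
  | succ n ih =>
    intro w hw hall
    cases w with
    | nil => simp [pvTok_nil]
    | cons c rest =>
      simp only [List.length_cons, Nat.add_le_add_iff_right] at hw
      simp only [List.all_cons, Bool.and_eq_true, Bool.not_eq_true'] at hall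
      have hrest : ∀ a ∈ rest, (!(p a || q a)) = (!q a) := by
        intro a ha
        have := (List.all_eq_true.mp hall.2) a ha
        simp only [Bool.not_eq_true'] at this
        simp [this]
      by_cases hq : q c
      · rw [pvTok_cons_pos _ c rest (by simp [hq]), pvTok_cons_pos q c rest hq]
        exact ih rest hw hall.2
      · rw [pvTok_cons_neg _ c rest (by simp [hall.1, hq]),
            pvTok_cons_neg q c rest (by simpa using hq)]
        have htw := (pvTW_congr _ _ rest hrest).1
        have hdw := (pvTW_congr _ _ rest hrest).2
        rw [htw, hdw]
        congr 1
        refine ih _ (le_trans (List.length_dropWhile_le _ _) hw) ?_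
        exact List.all_eq_true.mpr (fun a ha =>
          (List.all_eq_true.mp hall.2) a ((List.dropWhile_sublist _).subset ha))

lemma pvTok_or (p q : Char → Bool) :
    ∀ (n : ℕ) (l : List Char), l.length ≤ n →
      pvTok (fun c => p c || q c) l = (pvTok p l).flatMap (pvTok q) := by
  intro n
  induction n with
  | zero =>
    intro l hl
    have : l = [] := List.length_eq_zero_iff.mp (Nat.le_zero.mp hl)
    subst this
    simp [pvTok_nil]
  | succ n ih =>
    intro l hl
    cases l with
    | nil => simp [pvTok_nil]
    | cons c rest =>
      simp only [List.length_cons, Nat.add_le_add_iff_right] at hl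
      by_cases hp : p c
      · rw [pvTok_cons_pos _ c rest (by simp [hp]), pvTok_cons_pos p c rest hp]
        exact ih rest hl
      · rw [pvTok_cons_neg p c rest (by simpa using hp)]
        set w := c :: rest.takeWhile (fun x => !p x) with hw
        set r1 := rest.dropWhile (fun x => !p x) with hr1
        have hwall : w.all (fun x => !p x) = true := by
          rw [hw]
          simp only [List.all_cons, Bool.and_eq_true, Bool.not_eq_true']
          refine ⟨by simpa using hp, ?_⟩
          exact List.all_eq_true.mpr (fun a ha => by simpa using List.mem_takeWhile_imp ha)
        have hsplit : c :: rest = w ++ r1 := by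
          rw [hw, hr1]
          simp [List.takeWhile_append_dropWhile]
        have hr1len : r1.length ≤ n := le_trans (List.length_dropWhile_le _ _) hl
        rw [List.flatMap_cons, ← ih r1 hr1len, hsplit]
        cases hr : r1 with
        | nil =>
          rw [List.append_nil, pvTok_or_nop p q w.length w le_rfl hwall, pvTok_nil,
            List.append_nil]
        | cons e r2 =>
          have hpe : p e = true := by
            have := pvDW_head (fun x => !p x) rest e r2 (by rw [← hr1, hr])
            simpa using this
          rw [pvTok_append (fun x => p x || q x) e (by simp [hpe]) w.length w r2 le_rfl]
          rw [pvTok_or_nop p q w.length w le_rfl hwall]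
          congr 1
          rw [pvTok_cons_pos _ e r2 (by simp [hpe])]

lemma pvSplit0_go :
    ∀ (l cur : List Char) (acc : List (List Char)),
      cur.all (fun c => !PySem.Chars.isspace c) = true →
      PySem.Chars.split₀.go l cur acc =
        acc.reverse ++ pvTok PySem.Chars.isspace (cur.reverse ++ l) := by
  intro l
  induction l with
  | nil =>
    intro cur acc hcur
    simp only [PySem.Chars.split₀.go]
    rw [List.append_nil, pvTok_all _ _ (by simpa using hcur)]
    cases cur with
    | nil => simp
    | cons a t => simp
  | cons c rest ih =>
    intro cur acc hcur
    rw [PySem.Chars.split₀.go]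
    by_cases hsp : PySem.Chars.isspace c
    · rw [if_pos hsp]
      cases cur with
      | nil =>
        rw [if_pos (by simp), ih [] acc (by simp)]
        simp only [List.reverse_nil, List.nil_append]
        rw [pvTok_cons_pos _ c rest hsp]
      | cons a t =>
        rw [if_neg (by simp), ih [] ((a :: t).reverse :: acc) (by simp)]
        rw [pvTok_append _ c hsp (a :: t).reverse.length (a :: t).reverse rest le_rfl]
        rw [pvTok_all _ (a :: t).reverse (by rw [List.all_reverse]; exact hcur)]
        simp
    · rw [if_neg hsp, ih (c :: cur) acc ?_]
      · simp [List.append_assoc]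
      · simp only [List.all_cons, Bool.and_eq_true]
        exact ⟨by simpa using hsp, by simpa using hcur⟩

-- plain structural version of PySem.Chars.splitOn on separator "/"
def pvSon : List Char → List Char → List (List Char)
  | [], cur => [cur.reverse]
  | c :: rest, cur =>
    if c == '/' then cur.reverse :: pvSon rest []
    else pvSon rest (c :: cur)

lemma pvSon_go :
    ∀ (fuel : ℕ) (l cur : List Char) (acc : List (List Char)), l.length < fuel →
      PySem.Chars.splitOn.go ['/'] fuel l cur acc = acc.reverse ++ pvSon l cur := by
  intro fuel
  induction fuel with
  | zero => intro l cur acc h; omega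
  | succ fuel ih =>
    intro l cur acc h
    cases l with
    | nil =>
      rw [PySem.Chars.splitOn.go]
      · simp [pvSon]
      · simp
    | cons c rest =>
      rw [PySem.Chars.splitOn.go]
      by_cases hc : c = '/'
      · rw [if_pos (by simp [hc]), ih _ [] _ (by simp at h ⊢; omega)]
        simp [pvSon, hc]
      · rw [if_neg (by simp [List.isPrefixOf]; intro hcon; exact hc hcon.symm),
          ih rest (c :: cur) acc (by simp at h ⊢; omega)]
        simp [pvSon, hc]

lemma pvSplitOn_eq_son (l : List Char) :
    PySem.Chars.splitOn l ['/'] = pvSon l [] := by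
  rw [PySem.Chars.splitOn, pvSon_go (l.length + 1) l [] [] (by omega)]
  simp

lemma pvSon_mem :
    ∀ (l cur : List Char) (piece : List Char), piece ∈ pvSon l cur →
      ∀ x ∈ piece, x ∈ cur ∨ x ∈ l := by
  intro l
  induction l with
  | nil =>
    intro cur piece hp x hx
    simp [pvSon] at hp
    subst hp
    exact Or.inl (by simpa using hx)
  | cons c rest ih =>
    intro cur piece hp x hx
    by_cases hc : c = '/'
    · rw [pvSon, if_pos (by simp [hc])] at hp
      rcases List.mem_cons.mp hp with h | h
      · subst h; exact Or.inl (by simpa using hx)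
      · rcases ih [] piece h x hx with h' | h'
        · simp at h'
        · exact Or.inr (by simp [h'])
    · rw [pvSon, if_neg (by simp [hc])] at hp
      rcases ih (c :: cur) piece hp x hx with h' | h'
      · rcases List.mem_cons.mp h' with h'' | h''
        · exact Or.inr (by simp [h''])
        · exact Or.inl h''
      · exact Or.inr (by simp [h'])

lemma pvSon_filter :
    ∀ (l cur : List Char), cur.all (fun c => !(c == '/')) = true →
      (pvSon l cur).filter (fun w => !w.isEmpty) =
        pvTok (fun c => c == '/') (cur.reverse ++ l) := by
  intro l
  induction l with
  | nil =>
    intro cur hcur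
    rw [List.append_nil, pvTok_all _ _ (by simpa using hcur)]
    cases cur with
    | nil => simp [pvSon]
    | cons a t => simp [pvSon]
  | cons c rest ih =>
    intro cur hcur
    by_cases hc : c = '/'
    · rw [pvSon, if_pos (by simp [hc])]
      rw [pvTok_append _ c (by simp [hc]) cur.reverse.length cur.reverse rest le_rfl]
      rw [pvTok_all _ cur.reverse (by simpa using hcur)]
      rw [List.filter_cons, ih [] (by simp)]
      cases cur with
      | nil => simp
      | cons a t => simp
    · rw [pvSon, if_neg (by simp [hc]), ih (c :: cur) (by simp [hc, hcur])]
      simp [List.append_assoc]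

lemma pvStrip_id (l : List Char) (h : l.all (fun c => !PySem.Chars.isspace c) = true) :
    PySem.Chars.strip l = l := by
  have h1 : ∀ (m : List Char), m.all (fun c => !PySem.Chars.isspace c) = true →
      List.dropWhile PySem.Chars.isspace m = m := by
    intro m hm
    rw [List.dropWhile_eq_self_iff]
    cases m with
    | nil => simp
    | cons a t => simp_all
  simp only [PySem.Chars.strip, PySem.Chars.lstrip, PySem.Chars.rstrip]
  rw [h1 l h, h1 l.reverse (by simpa using h), List.reverse_reverse]

lemma pvFoldA :
    ∀ (codes : List (List Char)) (s : PySem.Set String),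
      codes.foldl pvStepA (s, s) =
        (List.foldl PySem.Set.add s
            (((codes.map PySem.Chars.strip).filter (fun w => !w.isEmpty)).map String.ofList),
         List.foldl PySem.Set.add s
            (((codes.map PySem.Chars.strip).filter (fun w => !w.isEmpty)).map String.ofList)) := by
  intro codes
  induction codes with
  | nil => intro s; simp
  | cons code0 rest ih =>
    intro s
    rw [List.foldl_cons]
    by_cases h0 : PySem.Chars.strip code0 = []
    · have hstep : pvStepA (s, s) code0 = (s, s) := by
        simp [pvStepA, h0]
      rw [hstep, ih s]
      simp [h0]
    · have hne : String.ofList (PySem.Chars.strip code0) ≠ "" := by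
        intro hcon
        exact h0 (by simpa using congrArg String.toList hcon)
      have hstep : pvStepA (s, s) code0 =
          (PySem.Set.add s (String.ofList (PySem.Chars.strip code0)),
           PySem.Set.add s (String.ofList (PySem.Chars.strip code0))) := by
        by_cases hmem : String.ofList (PySem.Chars.strip code0) ∈ s
        · simp [pvStepA, hne, PySem.Set.add, hmem]
        · simp [pvStepA, hne, PySem.Set.add, hmem]
      rw [hstep, ih]
      have hfil : ¬ (PySem.Chars.strip code0).isEmpty = true := by simpa using h0
      simp [hfil]

lemma pvScanB :
    ∀ (l : List Char) (ts : List String) (cur : List Char),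
      cur.all (fun c => !(PySem.Chars.isspace c || c == '/')) = true →
      ((l ++ [' ']).foldl pvStepB (ts, cur)).1 =
        ts ++ (pvTok (fun c => PySem.Chars.isspace c || c == '/') (cur ++ l)).map String.ofList := by
  intro l
  induction l with
  | nil =>
    intro ts cur hcur
    rw [List.append_nil, pvTok_all _ _ hcur]
    have hsp : PySem.Chars.isspace ' ' = true := by decide
    cases cur with
    | nil => simp [pvStepB, hsp]
    | cons a t => simp [pvStepB, hsp]
  | cons c rest ih =>
    intro ts cur hcur
    by_cases hD : (PySem.Chars.isspace c || c == '/') = true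
    · have hstep : pvStepB (ts, cur) c =
          ((if cur ≠ [] then ts ++ [String.ofList cur] else ts), []) := by
        cases cur with
        | nil => simp [pvStepB, hD]
        | cons a t => simp [pvStepB, hD]
      rw [List.cons_append, List.foldl_cons, hstep, ih _ [] (by simp)]
      rw [pvTok_append _ c hD cur.length cur rest le_rfl, pvTok_all _ cur hcur]
      cases cur with
      | nil => simp
      | cons a t => simp
    · have hstep : pvStepB (ts, cur) c = (ts, cur ++ [c]) := by
        simp [pvStepB, hD]
      rw [List.cons_append, List.foldl_cons, hstep,
        ih ts (cur ++ [c]) (by simp_all), List.append_assoc]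
      simp

-- ===== VERDICT (by name: the statement is the Claim_ definition above) =====
theorem parse_airports_spec : Claim_equal_parse_airports := by
  intro val _
  unfold Spec_parse_airports parse_airports parse_airports_alt
  by_cases hg : val = "" ∨ PySem.Str.strip val = "" ∨ PySem.Str.strip val = "NULL"
  · rw [if_pos hg, if_pos hg]
  · rw [if_neg hg, if_neg hg]
    have hsplit0 : PySem.Chars.split₀ val.toList = pvTok PySem.Chars.isspace val.toList := by
      rw [PySem.Chars.split₀, pvSplit0_go val.toList [] [] (by simp)]
      simp
    have hpartall : ∀ part ∈ PySem.Chars.split₀ val.toList,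
        part.all (fun c => !PySem.Chars.isspace c) = true := by
      intro part hp
      rw [hsplit0] at hp
      exact pvTok_mem_all PySem.Chars.isspace val.toList.length val.toList le_rfl part hp
    -- A's nested fold = one fold over the flattened code list
    have hA : ((PySem.Chars.split₀ val.toList).foldl
        (fun st part => (PySem.Chars.splitOn part ['/']).foldl pvStepA st)
        (PySem.Set.empty, [])).2 =
        PySem.Set.ofList ((pvTok (fun c => PySem.Chars.isspace c || c == '/') val.toList).map
          String.ofList) := by
      rw [← List.foldl_flatMap]
      rw [show ((PySem.Set.empty : PySem.Set String), ([] : List String)) =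
            ((PySem.Set.empty : PySem.Set String), (PySem.Set.empty : PySem.Set String)) from rfl]
      rw [pvFoldA ((PySem.Chars.split₀ val.toList).flatMap
        (fun part => PySem.Chars.splitOn part ['/'])) PySem.Set.empty]
      have hL : (((((PySem.Chars.split₀ val.toList).flatMap
            (fun part => PySem.Chars.splitOn part ['/'])).map PySem.Chars.strip).filter
            (fun w => !w.isEmpty)).map String.ofList) =
          ((pvTok (fun c => PySem.Chars.isspace c || c == '/') val.toList).map String.ofList) := by
        rw [List.map_flatMap]
        have hstrip : ∀ part ∈ PySem.Chars.split₀ val.toList,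
            (PySem.Chars.splitOn part ['/']).map PySem.Chars.strip =
              PySem.Chars.splitOn part ['/'] := by
          intro part hp
          have hmem : ∀ piece ∈ PySem.Chars.splitOn part ['/'],
              PySem.Chars.strip piece = piece := by
            intro piece hpiece
            rw [pvSplitOn_eq_son] at hpiece
            refine pvStrip_id piece (List.all_eq_true.mpr (fun x hx => ?_))
            rcases pvSon_mem part [] piece hpiece x hx with h | h
            · simp at h
            · have := (List.all_eq_true.mp (hpartall part hp)) x h
              simpa using this
          exact (List.map_congr_left hmem).trans (List.map_id _)
        rw [List.flatMap_congr hstrip, List.filter_flatMap]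
        have hfil : ∀ part ∈ PySem.Chars.split₀ val.toList,
            (PySem.Chars.splitOn part ['/']).filter (fun w => !w.isEmpty) =
              pvTok (fun c => c == '/') part := by
          intro part _
          rw [pvSplitOn_eq_son, pvSon_filter part [] (by simp)]
          simp
        rw [List.flatMap_congr hfil, hsplit0,
          ← pvTok_or PySem.Chars.isspace (fun c => c == '/') val.toList.length val.toList le_rfl]
      rw [hL, PySem.Set.ofList_eq_foldl]
      rfl
    rw [hA]
    -- B's scan produces the same token list
    have hBlist : (val ++ " ").toList = val.toList ++ [' '] := by
      rw [String.toList_append]; rfl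
    rw [hBlist, pvScanB val.toList [] [] (by simp)]
    rw [PySem.List.dedup]
    simp
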